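-- pv_equiv track=rewrite | github.com/Simonscat1/computer_vision | Определить количество фигур разных оттенков и формы/main.py | find_colors
-- ===== SOURCE A (Python) =====
-- def find_colors(figures):
--      colors = {
--           "red": 0,
--           "orange" : 0,
--           "yellow" : 0,
--           "green" : 0,
--           "light_blue" : 0,
--           "blue" : 0,
--           "purple" : 0
--      }
--      for i in figures:
--           if 15 <= i <= 40:
--                colors["orange"] += 1
--           if 40 <= i <= 80:
--                colors["yellow"] += 1
--           if 80 <= i <= 130:
--                colors["green"] += 1
--           if 130 <= i <= 190:
--                colors["light_blue"] += 1
--           if 190 <= i <= 260: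
--                colors["blue"] += 1
--           if 260 <= i <= 310:
--                colors["purple"] += 1
--           if (310 <= i <= 360) or (0 <= i <= 15):
--                colors["red"] += 1
--      return colors
-- ===== SOURCE B (Python) =====
-- RANGES = [
--     ("red", [(310, 360), (0, 15)]),
--     ("orange", [(15, 40)]),
--     ("yellow", [(40, 80)]),
--     ("green", [(80, 130)]),
--     ("light_blue", [(130, 190)]),
--     ("blue", [(190, 260)]),
--     ("purple", [(260, 310)]),
-- ]
--
-- def find_colors(figures):
--     return {
--         name: sum(1 for i in figures if any(lo <= i <= hi for lo, hi in subranges))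
--         for name, subranges in RANGES
--     }
-- ===== Notes on version B (the rewrite author's own statement) =====
-- stated objective: idiomatic
-- what changed: A walks the figures once updating a dict through seven hard-coded if-branches; B is table-driven: a list of (color, hue-subranges) records, with each color's count computed as one count of figures falling in any of its subranges (red's two sub-ranges live in one record).
import Mathlib
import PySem

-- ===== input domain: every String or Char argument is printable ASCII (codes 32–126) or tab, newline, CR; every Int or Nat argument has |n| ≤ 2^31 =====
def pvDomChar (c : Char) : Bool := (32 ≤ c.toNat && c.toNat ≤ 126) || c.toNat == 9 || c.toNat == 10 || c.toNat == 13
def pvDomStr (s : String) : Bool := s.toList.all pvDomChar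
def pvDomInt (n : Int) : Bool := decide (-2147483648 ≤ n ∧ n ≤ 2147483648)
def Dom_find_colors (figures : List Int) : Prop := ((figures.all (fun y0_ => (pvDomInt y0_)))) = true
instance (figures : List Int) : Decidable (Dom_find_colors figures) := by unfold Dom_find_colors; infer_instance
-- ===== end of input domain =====

-- B replaces A's per-figure loop with seven hard-coded if-branches updating a dict by a table of
-- (color, hue-subranges) records, computing each color's count as one count over the figures (idiomatic; same cost).

-- ===== PORT A =====
-- one iteration of A's for-loop body (the seven independent ifs, in A's order)
def pvStepA (d : PySem.Dict String Int) (i : Int) : PySem.Dict String Int :=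
  let d := if 15 ≤ i ∧ i ≤ 40 then d.modify "orange" 0 (· + 1) else d
  let d := if 40 ≤ i ∧ i ≤ 80 then d.modify "yellow" 0 (· + 1) else d
  let d := if 80 ≤ i ∧ i ≤ 130 then d.modify "green" 0 (· + 1) else d
  let d := if 130 ≤ i ∧ i ≤ 190 then d.modify "light_blue" 0 (· + 1) else d
  let d := if 190 ≤ i ∧ i ≤ 260 then d.modify "blue" 0 (· + 1) else d
  let d := if 260 ≤ i ∧ i ≤ 310 then d.modify "purple" 0 (· + 1) else d
  let d := if (310 ≤ i ∧ i ≤ 360) ∨ (0 ≤ i ∧ i ≤ 15) then d.modify "red" 0 (· + 1) else d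
  d

def find_colors (figures : List Int) : List (String × Int) :=
  (figures.foldl pvStepA (PySem.Dict.ofList
    [("red", 0), ("orange", 0), ("yellow", 0), ("green", 0),
     ("light_blue", 0), ("blue", 0), ("purple", 0)])).items

-- ===== PORT B =====
def pvRanges : List (String × List (Int × Int)) :=
  [("red", [(310, 360), (0, 15)]),
   ("orange", [(15, 40)]),
   ("yellow", [(40, 80)]),
   ("green", [(80, 130)]),
   ("light_blue", [(130, 190)]),
   ("blue", [(190, 260)]),
   ("purple", [(260, 310)])]

def pvInAny (rs : List (Int × Int)) (i : Int) : Bool :=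
  rs.any (fun r => decide (r.1 ≤ i) && decide (i ≤ r.2))

def find_colors_alt (figures : List Int) : List (String × Int) :=
  pvRanges.map (fun c => (c.1, ((figures.countP (pvInAny c.2)) : Int)))

-- ===== PRECONDITION & SPEC =====
def Spec_find_colors (figures : List Int) (out : List (String × Int)) : Prop := out = find_colors_alt figures
instance (figures : List Int) (out : List (String × Int)) : Decidable (Spec_find_colors figures out) := by unfold Spec_find_colors; infer_instance

-- ===== CLAIM (what is proved, stated in full; the proofs are below) =====
def Claim_equal_find_colors : Prop := ∀ (figures : List Int), Dom_find_colors figures → Spec_find_colors figures (find_colors figures)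

-- ===== LEMMAS AND PROOFS =====

theorem pvMod_red (r o y g lb b p : Int) :
    (PySem.Dict.mk [("red", r), ("orange", o), ("yellow", y), ("green", g), ("light_blue", lb), ("blue", b), ("purple", p)]).modify "red" 0 (· + 1) = PySem.Dict.mk [("red", (r + 1)), ("orange", o), ("yellow", y), ("green", g), ("light_blue", lb), ("blue", b), ("purple", p)] := by
  simp [PySem.Dict.modify, PySem.Dict.getD, PySem.Dict.get?, PySem.Dict.insert, PySem.Dict.contains]

theorem pvIf_red (c : Prop) [Decidable c] (r o y g lb b p : Int) :
    (if c then (PySem.Dict.mk [("red", r), ("orange", o), ("yellow", y), ("green", g), ("light_blue", lb), ("blue", b), ("purple", p)]).modify "red" 0 (· + 1) else PySem.Dict.mk [("red", r), ("orange", o), ("yellow", y), ("green", g), ("light_blue", lb), ("blue", b), ("purple", p)]) =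
    PySem.Dict.mk [("red", (r + if c then 1 else 0)), ("orange", o), ("yellow", y), ("green", g), ("light_blue", lb), ("blue", b), ("purple", p)] := by
  split_ifs <;> simp [pvMod_red]

theorem pvMod_orange (r o y g lb b p : Int) :
    (PySem.Dict.mk [("red", r), ("orange", o), ("yellow", y), ("green", g), ("light_blue", lb), ("blue", b), ("purple", p)]).modify "orange" 0 (· + 1) = PySem.Dict.mk [("red", r), ("orange", (o + 1)), ("yellow", y), ("green", g), ("light_blue", lb), ("blue", b), ("purple", p)] := by
  simp [PySem.Dict.modify, PySem.Dict.getD, PySem.Dict.get?, PySem.Dict.insert, PySem.Dict.contains]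

theorem pvIf_orange (c : Prop) [Decidable c] (r o y g lb b p : Int) :
    (if c then (PySem.Dict.mk [("red", r), ("orange", o), ("yellow", y), ("green", g), ("light_blue", lb), ("blue", b), ("purple", p)]).modify "orange" 0 (· + 1) else PySem.Dict.mk [("red", r), ("orange", o), ("yellow", y), ("green", g), ("light_blue", lb), ("blue", b), ("purple", p)]) =
    PySem.Dict.mk [("red", r), ("orange", (o + if c then 1 else 0)), ("yellow", y), ("green", g), ("light_blue", lb), ("blue", b), ("purple", p)] := by
  split_ifs <;> simp [pvMod_orange]

theorem pvMod_yellow (r o y g lb b p : Int) :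
    (PySem.Dict.mk [("red", r), ("orange", o), ("yellow", y), ("green", g), ("light_blue", lb), ("blue", b), ("purple", p)]).modify "yellow" 0 (· + 1) = PySem.Dict.mk [("red", r), ("orange", o), ("yellow", (y + 1)), ("green", g), ("light_blue", lb), ("blue", b), ("purple", p)] := by
  simp [PySem.Dict.modify, PySem.Dict.getD, PySem.Dict.get?, PySem.Dict.insert, PySem.Dict.contains]

theorem pvIf_yellow (c : Prop) [Decidable c] (r o y g lb b p : Int) :
    (if c then (PySem.Dict.mk [("red", r), ("orange", o), ("yellow", y), ("green", g), ("light_blue", lb), ("blue", b), ("purple", p)]).modify "yellow" 0 (· + 1) else PySem.Dict.mk [("red", r), ("orange", o), ("yellow", y), ("green", g), ("light_blue", lb), ("blue", b), ("purple", p)]) =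
    PySem.Dict.mk [("red", r), ("orange", o), ("yellow", (y + if c then 1 else 0)), ("green", g), ("light_blue", lb), ("blue", b), ("purple", p)] := by
  split_ifs <;> simp [pvMod_yellow]

theorem pvMod_green (r o y g lb b p : Int) :
    (PySem.Dict.mk [("red", r), ("orange", o), ("yellow", y), ("green", g), ("light_blue", lb), ("blue", b), ("purple", p)]).modify "green" 0 (· + 1) = PySem.Dict.mk [("red", r), ("orange", o), ("yellow", y), ("green", (g + 1)), ("light_blue", lb), ("blue", b), ("purple", p)] := by
  simp [PySem.Dict.modify, PySem.Dict.getD, PySem.Dict.get?, PySem.Dict.insert, PySem.Dict.contains]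

theorem pvIf_green (c : Prop) [Decidable c] (r o y g lb b p : Int) :
    (if c then (PySem.Dict.mk [("red", r), ("orange", o), ("yellow", y), ("green", g), ("light_blue", lb), ("blue", b), ("purple", p)]).modify "green" 0 (· + 1) else PySem.Dict.mk [("red", r), ("orange", o), ("yellow", y), ("green", g), ("light_blue", lb), ("blue", b), ("purple", p)]) =
    PySem.Dict.mk [("red", r), ("orange", o), ("yellow", y), ("green", (g + if c then 1 else 0)), ("light_blue", lb), ("blue", b), ("purple", p)] := by
  split_ifs <;> simp [pvMod_green]

theorem pvMod_light_blue (r o y g lb b p : Int) :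
    (PySem.Dict.mk [("red", r), ("orange", o), ("yellow", y), ("green", g), ("light_blue", lb), ("blue", b), ("purple", p)]).modify "light_blue" 0 (· + 1) = PySem.Dict.mk [("red", r), ("orange", o), ("yellow", y), ("green", g), ("light_blue", (lb + 1)), ("blue", b), ("purple", p)] := by
  simp [PySem.Dict.modify, PySem.Dict.getD, PySem.Dict.get?, PySem.Dict.insert, PySem.Dict.contains]

theorem pvIf_light_blue (c : Prop) [Decidable c] (r o y g lb b p : Int) :
    (if c then (PySem.Dict.mk [("red", r), ("orange", o), ("yellow", y), ("green", g), ("light_blue", lb), ("blue", b), ("purple", p)]).modify "light_blue" 0 (· + 1) else PySem.Dict.mk [("red", r), ("orange", o), ("yellow", y), ("green", g), ("light_blue", lb), ("blue", b), ("purple", p)]) =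
    PySem.Dict.mk [("red", r), ("orange", o), ("yellow", y), ("green", g), ("light_blue", (lb + if c then 1 else 0)), ("blue", b), ("purple", p)] := by
  split_ifs <;> simp [pvMod_light_blue]

theorem pvMod_blue (r o y g lb b p : Int) :
    (PySem.Dict.mk [("red", r), ("orange", o), ("yellow", y), ("green", g), ("light_blue", lb), ("blue", b), ("purple", p)]).modify "blue" 0 (· + 1) = PySem.Dict.mk [("red", r), ("orange", o), ("yellow", y), ("green", g), ("light_blue", lb), ("blue", (b + 1)), ("purple", p)] := by
  simp [PySem.Dict.modify, PySem.Dict.getD, PySem.Dict.get?, PySem.Dict.insert, PySem.Dict.contains]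

theorem pvIf_blue (c : Prop) [Decidable c] (r o y g lb b p : Int) :
    (if c then (PySem.Dict.mk [("red", r), ("orange", o), ("yellow", y), ("green", g), ("light_blue", lb), ("blue", b), ("purple", p)]).modify "blue" 0 (· + 1) else PySem.Dict.mk [("red", r), ("orange", o), ("yellow", y), ("green", g), ("light_blue", lb), ("blue", b), ("purple", p)]) =
    PySem.Dict.mk [("red", r), ("orange", o), ("yellow", y), ("green", g), ("light_blue", lb), ("blue", (b + if c then 1 else 0)), ("purple", p)] := by
  split_ifs <;> simp [pvMod_blue]

theorem pvMod_purple (r o y g lb b p : Int) :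
    (PySem.Dict.mk [("red", r), ("orange", o), ("yellow", y), ("green", g), ("light_blue", lb), ("blue", b), ("purple", p)]).modify "purple" 0 (· + 1) = PySem.Dict.mk [("red", r), ("orange", o), ("yellow", y), ("green", g), ("light_blue", lb), ("blue", b), ("purple", (p + 1))] := by
  simp [PySem.Dict.modify, PySem.Dict.getD, PySem.Dict.get?, PySem.Dict.insert, PySem.Dict.contains]

theorem pvIf_purple (c : Prop) [Decidable c] (r o y g lb b p : Int) :
    (if c then (PySem.Dict.mk [("red", r), ("orange", o), ("yellow", y), ("green", g), ("light_blue", lb), ("blue", b), ("purple", p)]).modify "purple" 0 (· + 1) else PySem.Dict.mk [("red", r), ("orange", o), ("yellow", y), ("green", g), ("light_blue", lb), ("blue", b), ("purple", p)]) =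
    PySem.Dict.mk [("red", r), ("orange", o), ("yellow", y), ("green", g), ("light_blue", lb), ("blue", b), ("purple", (p + if c then 1 else 0))] := by
  split_ifs <;> simp [pvMod_purple]

theorem pvStep_eq (i : Int) (r o y g lb b p : Int) :
    pvStepA (PySem.Dict.mk [("red", r), ("orange", o), ("yellow", y), ("green", g), ("light_blue", lb), ("blue", b), ("purple", p)]) i = PySem.Dict.mk [("red", (r + if (310 ≤ i ∧ i ≤ 360) ∨ (0 ≤ i ∧ i ≤ 15) then 1 else 0)), ("orange", (o + if 15 ≤ i ∧ i ≤ 40 then 1 else 0)), ("yellow", (y + if 40 ≤ i ∧ i ≤ 80 then 1 else 0)), ("green", (g + if 80 ≤ i ∧ i ≤ 130 then 1 else 0)), ("light_blue", (lb + if 130 ≤ i ∧ i ≤ 190 then 1 else 0)), ("blue", (b + if 190 ≤ i ∧ i ≤ 260 then 1 else 0)), ("purple", (p + if 260 ≤ i ∧ i ≤ 310 then 1 else 0))] := by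
  simp only [pvStepA]
  rw [pvIf_orange, pvIf_yellow, pvIf_green, pvIf_light_blue, pvIf_blue, pvIf_purple, pvIf_red]

theorem pvFoldA (figures : List Int) : ∀ (r o y g lb b p : Int),
    figures.foldl pvStepA (PySem.Dict.mk [("red", r), ("orange", o), ("yellow", y), ("green", g), ("light_blue", lb), ("blue", b), ("purple", p)]) =
    PySem.Dict.mk [("red", (r + (figures.countP (pvInAny [(310, 360), (0, 15)]) : Int))), ("orange", (o + (figures.countP (pvInAny [(15, 40)]) : Int))), ("yellow", (y + (figures.countP (pvInAny [(40, 80)]) : Int))), ("green", (g + (figures.countP (pvInAny [(80, 130)]) : Int))), ("light_blue", (lb + (figures.countP (pvInAny [(130, 190)]) : Int))), ("blue", (b + (figures.countP (pvInAny [(190, 260)]) : Int))), ("purple", (p + (figures.countP (pvInAny [(260, 310)]) : Int)))] := by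
  induction figures with
  | nil => intro r o y g lb b p; simp
  | cons i t ih =>
    intro r o y g lb b p
    rw [List.foldl_cons, pvStep_eq, ih]
    simp only [List.countP_cons, PySem.Dict.mk.injEq, List.cons.injEq, Prod.mk.injEq,
      pvInAny, List.any_cons, List.any_nil, Bool.or_false, Bool.or_eq_true, Bool.and_eq_true, decide_eq_true_eq]
    refine ⟨⟨trivial, ?_⟩, ⟨trivial, ?_⟩, ⟨trivial, ?_⟩, ⟨trivial, ?_⟩, ⟨trivial, ?_⟩, ⟨trivial, ?_⟩, ⟨trivial, ?_⟩, trivial⟩ <;>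
      (split_ifs <;> push_cast <;> omega)

-- the literal initial dict, built by ofList, is the corresponding 7-entry Dict.mk
theorem pvInit_eq : (PySem.Dict.ofList
    [("red", (0 : Int)), ("orange", 0), ("yellow", 0), ("green", 0),
     ("light_blue", 0), ("blue", 0), ("purple", 0)]) =
    PySem.Dict.mk [("red", 0), ("orange", 0), ("yellow", 0), ("green", 0),
     ("light_blue", 0), ("blue", 0), ("purple", 0)] := by decide

-- ===== VERDICT (by name: the statement is the Claim_ definition above) =====
theorem find_colors_spec : Claim_equal_find_colors := by
  intro figures _
  show find_colors figures = find_colors_alt figures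
  rw [find_colors, pvInit_eq, pvFoldA]
  simp [find_colors_alt, pvRanges]
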